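-- pv_equiv track=rewrite | github.com/krzysiekbienias/algo-dragons | mathematics/combinatory.py | exponential_growth
-- ===== SOURCE A (Python) =====
-- def exponential_growth(n, factor, days):
--     results = [n]
--     i = 1
--     while i <= days:
--         results.append(n * factor)
--         n = n * factor
--         i += 1
--     return results
-- ===== SOURCE B (Python) =====
-- from itertools import accumulate
-- from operator import mul
--
-- def exponential_growth(n, factor, days):
--     return list(accumulate([n] + [factor] * days, mul))
-- ===== Notes on version B (the rewrite author's own statement) =====
-- stated objective: idiomatic
-- what changed: Replaces the explicit while loop with index counter and mutable accumulator by building the sequence [n]+[factor]*days and folding it with itertools.accumulate(mul) in one library call.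
import Mathlib
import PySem

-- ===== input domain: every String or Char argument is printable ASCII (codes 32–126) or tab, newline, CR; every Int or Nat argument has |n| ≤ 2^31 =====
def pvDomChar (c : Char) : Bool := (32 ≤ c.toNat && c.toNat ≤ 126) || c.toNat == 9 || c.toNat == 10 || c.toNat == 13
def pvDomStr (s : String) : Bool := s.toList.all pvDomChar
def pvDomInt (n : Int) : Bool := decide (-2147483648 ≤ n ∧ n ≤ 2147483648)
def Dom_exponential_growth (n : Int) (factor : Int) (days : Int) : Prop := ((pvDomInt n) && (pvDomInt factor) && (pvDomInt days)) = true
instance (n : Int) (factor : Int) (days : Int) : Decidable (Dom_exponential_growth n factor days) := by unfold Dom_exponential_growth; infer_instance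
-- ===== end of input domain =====

-- B replaces A's explicit while loop and mutable accumulator by one
-- itertools.accumulate(mul) fold over [n] + [factor]*days (same multiplication order).

-- ===== PORT A =====
-- the while loop: state (results, n, i); runs while i ≤ days
def egLoop (factor : Int) (results : List Int) (n : Int) (i : Int) (days : Int) : List Int :=
  if _h : i ≤ days then
    egLoop factor (results ++ [n * factor]) (n * factor) (i + 1) days
  else results
termination_by (days + 1 - i).toNat
decreasing_by omega

def exponential_growth (n : Int) (factor : Int) (days : Int) : List Int :=
  egLoop factor [n] n 1 days

-- ===== PORT B =====
-- itertools.accumulate with operator.mul: first element as-is, then running products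
def accMulGo (acc : Int) : List Int → List Int
  | [] => []
  | x :: xs => (acc * x) :: accMulGo (acc * x) xs

def pyAccumulateMul : List Int → List Int
  | [] => []
  | x :: xs => x :: accMulGo x xs

def exponential_growth_alt (n : Int) (factor : Int) (days : Int) : List Int :=
  pyAccumulateMul ([n] ++ List.replicate days.toNat factor)

-- ===== PRECONDITION & SPEC =====
def Spec_exponential_growth (n : Int) (factor : Int) (days : Int) (out : List Int) : Prop := out = exponential_growth_alt n factor days
instance (n : Int) (factor : Int) (days : Int) (out : List Int) : Decidable (Spec_exponential_growth n factor days out) := by unfold Spec_exponential_growth; infer_instance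

-- ===== CLAIM (what is proved, stated in full; the proofs are below) =====
def Claim_equal_exponential_growth : Prop := ∀ (n : Int) (factor : Int) (days : Int), Dom_exponential_growth n factor days → Spec_exponential_growth n factor days (exponential_growth n factor days)

-- ===== LEMMAS AND PROOFS =====

-- the while loop appends exactly the running products of k copies of factor
theorem egLoop_eq_accMulGo (factor : Int) : ∀ (k : Nat) (res : List Int) (n i days : Int),
    (days + 1 - i).toNat = k →
    egLoop factor res n i days = res ++ accMulGo n (List.replicate k factor) := by
  intro k
  induction k with
  | zero =>
    intro res n i days hk
    rw [egLoop]
    have : ¬ i ≤ days := by omega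
    simp [this, accMulGo]
  | succ k ih =>
    intro res n i days hk
    rw [egLoop]
    have h : i ≤ days := by omega
    simp only [h, dite_true]
    rw [ih (res ++ [n * factor]) (n * factor) (i + 1) days (by omega)]
    simp [accMulGo, List.replicate_succ]

-- ===== VERDICT (by name: the statement is the Claim_ definition above) =====

theorem exponential_growth_spec : Claim_equal_exponential_growth := by
  intro n factor days _
  unfold Spec_exponential_growth exponential_growth exponential_growth_alt
  rw [egLoop_eq_accMulGo factor days.toNat [n] n 1 days (by omega)]
  simp [pyAccumulateMul]
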